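-- pv_equiv track=rewrite | github.com/NathanFaulkner/encyclopedia | app/questions/__init__.py | fmt_abs_value
-- ===== SOURCE A (Python) =====
-- def fmt_abs_value(string):
--     count = 0
--     i = 0
--     while i < len(string):
--         if string[i] == '|':
--             if count % 2 == 0:
--                 string = string[:i] + 'Abs(' + string[i+1:]
--             else:
--                 string = string[:i] + ")" + string[i+1:]
--             count += 1
--         i += 1
--     return string
-- ===== SOURCE B (Python) =====
-- def fmt_abs_value(string):
--     parts = string.split('|')
--     out = parts[0]
--     i = 0
--     for part in parts[1:]:
--         out += 'Abs(' if i % 2 == 0 else ')'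
--         out += part
--         i += 1
--     return out
-- ===== Notes on version B (the rewrite author's own statement) =====
-- stated objective: faster
-- what changed: Replaces A's char-by-char rescanning loop, which splices each separator into the string and rebuilds it on every pipe, with a single split on the pipe character followed by one join-style pass over the parts with an alternating separator.
import Mathlib
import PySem

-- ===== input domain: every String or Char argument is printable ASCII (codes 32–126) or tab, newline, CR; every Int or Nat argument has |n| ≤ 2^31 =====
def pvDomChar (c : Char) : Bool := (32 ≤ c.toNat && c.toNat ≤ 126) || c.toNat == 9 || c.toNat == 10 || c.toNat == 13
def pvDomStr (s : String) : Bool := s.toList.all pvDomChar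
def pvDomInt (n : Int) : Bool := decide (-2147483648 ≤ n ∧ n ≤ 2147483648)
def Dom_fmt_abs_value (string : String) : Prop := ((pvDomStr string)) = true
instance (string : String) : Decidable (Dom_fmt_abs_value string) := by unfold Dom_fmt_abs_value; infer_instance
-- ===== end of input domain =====

-- B replaces A's in-place splice-and-rescan loop by split('|') + an alternating-separator join (simpler, one pass).


-- ===== PORT A =====
-- the while loop: i and count are the Python locals; string[:i] / string[i+1:] are
-- List.take i / List.drop (i+1), exact for the nonnegative indices A uses.
def pvLoopA (s : List Char) (i : Nat) (count : Nat) : List Char :=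
  if h : i < s.length then
    if s[i] = '|' then
      if count % 2 = 0 then
        pvLoopA (s.take i ++ ('A' :: 'b' :: 's' :: '(' :: []) ++ s.drop (i+1)) (i+1) (count+1)
      else
        pvLoopA (s.take i ++ [')'] ++ s.drop (i+1)) (i+1) (count+1)
    else pvLoopA s (i+1) count
  else s
termination_by 3 * ((s.drop i).countP (· = '|')) + (s.length - i)
decreasing_by
  · have hd : s.drop i = s[i] :: s.drop (i+1) := List.drop_eq_getElem_cons h
    have hlen : (s.take i).length = i := by simp; omega
    have hdrop : (s.take i ++ ('A' :: 'b' :: 's' :: '(' :: []) ++ s.drop (i+1)).drop (i+1)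
        = 'b' :: 's' :: '(' :: s.drop (i+1) := by
      rw [List.append_assoc, List.drop_append]
      rw [List.drop_eq_nil_of_le (by omega), show i + 1 - (s.take i).length = 1 by omega]
      rfl
    have hcnt : (s.drop i).countP (· = '|') = ((s.drop (i+1)).countP (· = '|')) + 1 := by
      rw [hd]; simp_all
    simp only [hdrop, List.length_append, List.length_drop, hlen, hcnt]
    simp
    omega
  · have hd : s.drop i = s[i] :: s.drop (i+1) := List.drop_eq_getElem_cons h
    have hlen : (s.take i).length = i := by simp; omega
    have hdrop : (s.take i ++ [')'] ++ s.drop (i+1)).drop (i+1) = s.drop (i+1) := by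
      rw [List.append_assoc, List.drop_append]
      rw [List.drop_eq_nil_of_le (by omega), show i + 1 - (s.take i).length = 1 by omega]
      rfl
    have hcnt : (s.drop i).countP (· = '|') = ((s.drop (i+1)).countP (· = '|')) + 1 := by
      rw [hd]; simp_all
    simp only [hdrop, List.length_append, List.length_drop, hlen, hcnt]
    simp
    omega
  · have hd : s.drop i = s[i] :: s.drop (i+1) := List.drop_eq_getElem_cons h
    have hcnt : (s.drop (i+1)).countP (· = '|') ≤ (s.drop i).countP (· = '|') := by
      rw [hd, List.countP_cons]; exact Nat.le_add_right _ _
    omega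

def fmt_abs_value (string : String) : String :=
  String.ofList (pvLoopA string.toList 0 0)

-- ===== PORT B =====
-- parts = string.split('|'); out = parts[0]; then one pass over parts[1:] with a
-- counter i, appending 'Abs(' when i is even else ')', then the part.
def fmt_abs_value_alt (string : String) : String :=
  let parts := PySem.Chars.splitOn string.toList ['|']
  let st := (PySem.List.slice parts (some 1) none).foldl
      (fun (st : Nat × List Char) p =>
        (st.1 + 1, st.2 ++ (if st.1 % 2 = 0 then 'A' :: 'b' :: 's' :: '(' :: [] else [')']) ++ p))
      (0, PySem.List.pyGetD parts 0 [])
  String.ofList st.2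

-- ===== PRECONDITION & SPEC =====
def Spec_fmt_abs_value (string : String) (out : String) : Prop := out = fmt_abs_value_alt string
instance (string : String) (out : String) : Decidable (Spec_fmt_abs_value string out) := by unfold Spec_fmt_abs_value; infer_instance

-- ===== CLAIM (what is proved, stated in full; the proofs are below) =====
def Claim_equal_fmt_abs_value : Prop := ∀ (string : String), Dom_fmt_abs_value string → Spec_fmt_abs_value string (fmt_abs_value string)

-- ===== LEMMAS AND PROOFS =====

-- the alternating separator: 'Abs(' on even count, ')' on odd
def pvSep (c : Nat) : List Char := if c % 2 = 0 then 'A' :: 'b' :: 's' :: '(' :: [] else [')']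

-- one-pass spec: replace each '|' by the alternating separator
def pvRepl (c : Nat) : List Char → List Char
  | [] => []
  | x :: xs => if x = '|' then pvSep c ++ pvRepl (c+1) xs else x :: pvRepl c xs

-- structural split on '|'
def pvSp : List Char → List (List Char)
  | [] => [[]]
  | x :: xs =>
    if x = '|' then [] :: pvSp xs
    else match pvSp xs with
      | [] => [[x]]
      | p :: ps => (x :: p) :: ps

-- the joined tail: separator c, part, separator c+1, part, …
def pvGlue (c : Nat) : List (List Char) → List Char
  | [] => []
  | p :: ps => pvSep c ++ p ++ pvGlue (c+1) ps

theorem pvSp_ne_nil (l : List Char) : pvSp l ≠ [] := by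
  induction l with
  | nil => simp [pvSp]
  | cons x xs ih =>
    unfold pvSp
    split
    · simp
    · cases h : pvSp xs <;> simp

theorem pvSplitOn_go_eq (fuel : Nat) :
    ∀ (l cur : List Char) (acc : List (List Char)), l.length < fuel →
    PySem.Chars.splitOn.go ['|'] fuel l cur acc
      = acc.reverse ++ (cur.reverse ++ (pvSp l).headD []) :: (pvSp l).tail := by
  induction fuel with
  | zero => intro l cur acc h; omega
  | succ fuel ih =>
    intro l cur acc h
    match l with
    | [] => simp [PySem.Chars.splitOn.go, pvSp]
    | c :: rest =>
      by_cases hc : c = '|'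
      · subst hc
        rw [show PySem.Chars.splitOn.go ['|'] (fuel+1) ('|' :: rest) cur acc
            = PySem.Chars.splitOn.go ['|'] fuel rest [] (cur.reverse :: acc) by
          simp [PySem.Chars.splitOn.go, List.isPrefixOf]]
        rw [ih rest [] (cur.reverse :: acc) (by simpa using Nat.lt_of_succ_lt_succ h)]
        have hne := pvSp_ne_nil rest
        cases hsp : pvSp rest with
        | nil => exact absurd hsp hne
        | cons p ps => simp [pvSp, hsp]
      · rw [show PySem.Chars.splitOn.go ['|'] (fuel+1) (c :: rest) cur acc
            = PySem.Chars.splitOn.go ['|'] fuel rest (c :: cur) acc by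
          simp [PySem.Chars.splitOn.go, List.isPrefixOf, (Ne.symm hc : '|' ≠ c)]]
        rw [ih rest (c :: cur) acc (by simpa using Nat.lt_of_succ_lt_succ h)]
        have hne := pvSp_ne_nil rest
        cases hsp : pvSp rest with
        | nil => exact absurd hsp hne
        | cons p ps => simp [pvSp, hsp, hc]

theorem pvSplitOn_eq (l : List Char) :
    PySem.Chars.splitOn l ['|'] = pvSp l := by
  unfold PySem.Chars.splitOn
  rw [pvSplitOn_go_eq (l.length + 1) l [] [] (by omega)]
  have hne := pvSp_ne_nil l
  cases hsp : pvSp l with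
  | nil => exact absurd hsp hne
  | cons p ps => simp

theorem pvLoopA_eq (s : List Char) (i : Nat) (count : Nat) :
    pvLoopA s i count = s.take i ++ pvRepl count (s.drop i) := by
  fun_induction pvLoopA s i count with
  | case1 s i count h hpipe heven ih =>
    have hlen : (s.take i).length = i := by simp; omega
    have hd : s.drop i = s[i] :: s.drop (i+1) := List.drop_eq_getElem_cons h
    have htake : (s.take i ++ ('A' :: 'b' :: 's' :: '(' :: []) ++ s.drop (i+1)).take (i+1)
        = s.take i ++ ['A'] := by
      rw [List.append_assoc, List.take_append]
      rw [List.take_of_length_le (by omega), show i + 1 - (s.take i).length = 1 by omega]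
      rfl
    have hdrop : (s.take i ++ ('A' :: 'b' :: 's' :: '(' :: []) ++ s.drop (i+1)).drop (i+1)
        = 'b' :: 's' :: '(' :: s.drop (i+1) := by
      rw [List.append_assoc, List.drop_append]
      rw [List.drop_eq_nil_of_le (by omega), show i + 1 - (s.take i).length = 1 by omega]
      rfl
    rw [ih, htake, hdrop, hd, hpipe]
    simp [pvRepl, pvSep, heven]
  | case2 s i count h hpipe hodd ih =>
    have hlen : (s.take i).length = i := by simp; omega
    have hd : s.drop i = s[i] :: s.drop (i+1) := List.drop_eq_getElem_cons h
    have htake : (s.take i ++ [')'] ++ s.drop (i+1)).take (i+1) = s.take i ++ [')'] := by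
      rw [List.append_assoc, List.take_append]
      rw [List.take_of_length_le (by omega), show i + 1 - (s.take i).length = 1 by omega]
      rfl
    have hdrop : (s.take i ++ [')'] ++ s.drop (i+1)).drop (i+1) = s.drop (i+1) := by
      rw [List.append_assoc, List.drop_append]
      rw [List.drop_eq_nil_of_le (by omega), show i + 1 - (s.take i).length = 1 by omega]
      rfl
    rw [ih, htake, hdrop, hd, hpipe]
    simp [pvRepl, pvSep, hodd]
  | case3 s i count h hpipe ih =>
    have hd : s.drop i = s[i] :: s.drop (i+1) := List.drop_eq_getElem_cons h
    have htake : s.take (i+1) = s.take i ++ [s[i]] := by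
      rw [List.take_add_one]; simp [List.getElem?_eq_getElem h]
    rw [ih, htake, hd, pvRepl, if_neg hpipe, List.append_assoc]
    rfl
  | case4 s i count h =>
    have : s.length ≤ i := by omega
    simp [List.drop_eq_nil_of_le this, List.take_of_length_le this, pvRepl]

theorem pvRepl_eq_glue (cs : List Char) : ∀ c : Nat,
    pvRepl c cs = (pvSp cs).headD [] ++ pvGlue c (pvSp cs).tail := by
  induction cs with
  | nil => intro c; simp [pvRepl, pvSp, pvGlue]
  | cons x xs ih =>
    intro c
    by_cases hx : x = '|'
    · subst hx
      have hne := pvSp_ne_nil xs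
      cases hsp : pvSp xs with
      | nil => exact absurd hsp hne
      | cons p ps =>
        simp only [pvRepl, pvSp, ih (c+1), hsp]
        simp [pvGlue]
    · have hne := pvSp_ne_nil xs
      cases hsp : pvSp xs with
      | nil => exact absurd hsp hne
      | cons p ps =>
        simp only [pvRepl, if_neg hx, pvSp, ih c, hsp]
        simp

theorem pvFold_eq_glue (ps : List (List Char)) : ∀ (i : Nat) (acc : List Char),
    (ps.foldl
      (fun (st : Nat × List Char) p =>
        (st.1 + 1, st.2 ++ (if st.1 % 2 = 0 then 'A' :: 'b' :: 's' :: '(' :: [] else [')']) ++ p))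
      (i, acc)).2 = acc ++ pvGlue i ps := by
  induction ps with
  | nil => intro i acc; simp [pvGlue]
  | cons p ps ih =>
    intro i acc
    simp only [List.foldl_cons, ih, pvGlue, pvSep]
    split <;> simp

-- ===== VERDICT (by name: the statement is the Claim_ definition above) =====
theorem fmt_abs_value_spec : Claim_equal_fmt_abs_value := by
  intro s _
  show fmt_abs_value s = fmt_abs_value_alt s
  obtain ⟨p, ps, hsp⟩ : ∃ p ps, pvSp s.toList = p :: ps := by
    cases h : pvSp s.toList with
    | nil => exact absurd h (pvSp_ne_nil _)
    | cons p ps => exact ⟨p, ps, rfl⟩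
  unfold fmt_abs_value fmt_abs_value_alt
  simp only [pvSplitOn_eq, hsp, PySem.List.slice_from_one, List.tail_cons, pvLoopA_eq,
    List.take_zero, List.drop_zero]
  rw [pvFold_eq_glue ps 0 _, pvRepl_eq_glue s.toList 0, hsp]
  simp [PySem.List.pyGetD]
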